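-- pv_equiv track=rewrite | github.com/ojs201/Algorithm-Study_23-2 | JiYeonShin/1st week assignment/이진 변환 반복하기.py | solution
-- ===== SOURCE A (Python) =====
-- def solution(s):
--     answer = [0, 0]
--     while(s != "1"):
--         answer[0] += 1
--         answer[1] += s.count("0")
--         s = s.replace("0", "")
--         s = bin(len(s))[2:] #반환값은 항상 0b 접두어로 시작
--     return answer
-- ===== SOURCE B (Python) =====
-- def _chain(n):
--     # pair (conversions, zeros removed) to reduce n to 1 via n -> popcount(n)
--     if n == 1:
--         return (0, 0)
--     p = bin(n).count("1")
--     c, z = _chain(p)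
--     return (c + 1, z + n.bit_length() - p)
--
--
-- def solution(s):
--     if s == "1":
--         return [0, 0]
--     ones = zeros = 0
--     for ch in s:
--         if ch == "0":
--             zeros += 1
--         else:
--             ones += 1
--     c, z = _chain(ones)
--     return [c + 1, z + zeros]
-- ===== Notes on version B (the rewrite author's own statement) =====
-- stated objective: alternative
-- what changed: B makes one accumulator pass over the string to split it into zero/non-zero counts, then a recursive function on the popcount orbit returns the (conversions, zeros) pair bottom-up, instead of A's destructive while loop that rebuilds and rescans binary strings.
import Mathlib
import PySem

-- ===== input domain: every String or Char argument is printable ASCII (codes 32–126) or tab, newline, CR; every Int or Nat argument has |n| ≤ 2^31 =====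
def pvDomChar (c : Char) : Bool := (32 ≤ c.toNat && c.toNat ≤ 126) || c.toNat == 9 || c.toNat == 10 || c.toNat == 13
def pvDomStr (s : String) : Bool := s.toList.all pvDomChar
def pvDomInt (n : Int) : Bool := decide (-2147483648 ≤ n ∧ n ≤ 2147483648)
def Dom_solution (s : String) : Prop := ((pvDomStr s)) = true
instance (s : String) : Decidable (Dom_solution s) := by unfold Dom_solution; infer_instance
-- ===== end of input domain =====

-- B replaces A's destructive rebuild-and-rescan string loop by one accumulator pass over
-- the string plus a recursive function on the popcount orbit (objective: alternative).

-- ===== PORT A =====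
-- hand port of Python's bin(n)[2:] for n ≥ 0 (exact there: binary digits, MSB first, "0" for 0)
def pvBits (n : Nat) : List Char :=
  if n = 0 then [] else pvBits (n / 2) ++ [if n % 2 = 1 then '1' else '0']
decreasing_by rename_i h; exact Nat.div_lt_self (Nat.pos_of_ne_zero h) (by omega)

def pvBinStr (n : Nat) : List Char := if n = 0 then ['0'] else pvBits n

-- A's while loop; the fuel argument only makes it total (A diverges on inputs with no
-- non-'0' character; those are outside Pre_solution). s.count("0") / s.replace("0","")
-- are single-char count / filter, exact on every string.
def pvLoopA (fuel : Nat) (s : List Char) (a0 a1 : Int) : List Int :=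
  match fuel with
  | 0 => [a0, a1]
  | f + 1 =>
    if s = ['1'] then [a0, a1]
    else pvLoopA f (pvBinStr (s.filter (fun c => c ≠ '0')).length)
           (a0 + 1) (a1 + (s.count '0' : Int))

def solution (s : String) : List Int := pvLoopA (s.toList.length + 1) s.toList 0 0

-- ===== PORT B =====
-- cited by pvChain's decreasing_by
theorem pvBitCount_le (m : Nat) : PySem.Int.bitCount (m : Int) ≤ m := by
  induction m using Nat.strong_induction_on with
  | _ m ih =>
    rcases Nat.eq_zero_or_pos m with h | h
    · simp [h]
    · rw [PySem.Int.bitCount_natCast h]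
      have := ih (m / 2) (Nat.div_lt_self h (by omega))
      omega

theorem pvBitCount_lt (m : Nat) (h : 2 ≤ m) : PySem.Int.bitCount (m : Int) < m := by
  rw [PySem.Int.bitCount_natCast (by omega : 0 < m)]
  have h2 := pvBitCount_le (m / 2)
  omega

-- B's recursion _chain; Python's `if n == 1` base case is rendered `n ≤ 1` only to make
-- the port total at n = 0, where Python B recurses without a base case — outside Pre_solution.
-- bin(n).count("1") is the popcount of n ≥ 0, ported as PySem.Int.bitCount.
def pvChain (n : Nat) : Int × Int :=
  if n ≤ 1 then (0, 0)
  else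
    let p := PySem.Int.bitCount (n : Int)
    let cz := pvChain p
    (cz.1 + 1, cz.2 + ((PySem.Int.bitLength (n : Int) : Int) - (p : Int)))
termination_by n
decreasing_by exact pvBitCount_lt n (by omega)

def solution_alt (s : String) : List Int :=
  if s = "1" then [0, 0]
  else
    let acc := s.toList.foldl
      (fun (p : Nat × Nat) ch => if ch = '0' then (p.1, p.2 + 1) else (p.1 + 1, p.2)) (0, 0)
    let cz := pvChain acc.1
    [cz.1 + 1, cz.2 + (acc.2 : Int)]

-- ===== PRECONDITION & SPEC =====
-- Pre_ excludes exactly the strings with no character other than '0' (empty or all-zero):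
-- there A's loop never reaches "1" and diverges; B exhausts the recursion depth there.
def Pre_solution (s : String) : Prop := s.toList.any (fun c => c ≠ '0') = true
instance (s : String) : Decidable (Pre_solution s) := by unfold Pre_solution; infer_instance
def pvWitness_solution : String := "110"

def Spec_solution (s : String) (out : List Int) : Prop := out = solution_alt s
instance (s : String) (out : List Int) : Decidable (Spec_solution s out) := by unfold Spec_solution; infer_instance

-- ===== CLAIM (what is proved, stated in full; the proofs are below) =====
def Claim_equal_solution : Prop := ∀ (s : String), Dom_solution s → Pre_solution s → Spec_solution s (solution s)

-- ===== LEMMAS AND PROOFS =====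

theorem pvBitCount_pos (m : Nat) (h : 1 ≤ m) : 1 ≤ PySem.Int.bitCount (m : Int) := by
  induction m using Nat.strong_induction_on with
  | _ m ih =>
    rw [PySem.Int.bitCount_natCast h]
    rcases Nat.eq_zero_or_pos (m % 2) with h2 | h2
    · have hm : 1 ≤ m / 2 := by omega
      have := ih (m / 2) (Nat.div_lt_self h (by omega)) hm
      omega
    · omega

theorem pvBits_filter (m : Nat) :
    (pvBits m).filter (fun c => decide (c ≠ '0')) = List.replicate (PySem.Int.bitCount (m : Int)) '1' := by
  induction m using Nat.strong_induction_on with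
  | _ m ih =>
    rcases Nat.eq_zero_or_pos m with h | h
    · subst h; simp [pvBits]
    · rw [pvBits, if_neg (by omega : ¬ m = 0), PySem.Int.bitCount_natCast h,
        List.filter_append, ih (m / 2) (Nat.div_lt_self h (by omega))]
      rcases Nat.mod_two_eq_zero_or_one m with h2 | h2
      · simp [h2]
      · simp [h2]
        rw [Nat.add_comm, List.replicate_succ']

theorem pvBits_count0 (m : Nat) :
    (pvBits m).count '0' + PySem.Int.bitCount (m : Int) = PySem.Int.bitLength (m : Int) := by
  induction m using Nat.strong_induction_on with
  | _ m ih =>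
    rcases Nat.eq_zero_or_pos m with h | h
    · subst h; simp [pvBits]
    · rw [pvBits, if_neg (by omega : ¬ m = 0), PySem.Int.bitCount_natCast h,
        PySem.Int.bitLength_natCast h]
      have hrec := ih (m / 2) (Nat.div_lt_self h (by omega))
      rcases Nat.mod_two_eq_zero_or_one m with h2 | h2 <;>
        simp [h2, List.count_append] at hrec ⊢ <;> omega

theorem pvBits_length (m : Nat) : (pvBits m).length = PySem.Int.bitLength (m : Int) := by
  induction m using Nat.strong_induction_on with
  | _ m ih =>
    rcases Nat.eq_zero_or_pos m with h | h
    · subst h; simp [pvBits]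
    · rw [pvBits, if_neg (by omega : ¬ m = 0), PySem.Int.bitLength_natCast h]
      simp [ih (m / 2) (Nat.div_lt_self h (by omega))]

theorem pvBitLen_pos (m : Nat) (h : 1 ≤ m) : 1 ≤ PySem.Int.bitLength (m : Int) := by
  rw [PySem.Int.bitLength_natCast h]; omega

theorem pvBits_one : pvBits 1 = ['1'] := by
  rw [pvBits]; simp [pvBits]

theorem pvBits_ne_one (m : Nat) (h : 2 ≤ m) : pvBits m ≠ ['1'] := by
  intro hc
  have hl := pvBits_length m
  rw [hc, PySem.Int.bitLength_natCast (by omega : 0 < m)] at hl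
  have := pvBitLen_pos (m / 2) (by omega)
  simp only [List.length_singleton] at hl
  omega

-- main invariant: once A's state is the binary string of n ≥ 1, A's loop computes what
-- B's recursion returns, shifted by the accumulators
theorem pvChain_eq (n : Nat) (hn : 1 ≤ n) :
    ∀ fuel a0 a1, n ≤ fuel →
      pvLoopA fuel (pvBinStr n) a0 a1 = [a0 + (pvChain n).1, a1 + (pvChain n).2] := by
  induction n using Nat.strong_induction_on with
  | _ n ih =>
    intro fuel a0 a1 hf
    obtain ⟨f, rfl⟩ : ∃ f, fuel = f + 1 := ⟨fuel - 1, by omega⟩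
    rcases Nat.lt_or_ge n 2 with h2 | h2
    · have : n = 1 := by omega
      subst this
      rw [pvLoopA, pvChain]
      simp [pvBinStr, pvBits_one]
    · have hbs : pvBinStr n = pvBits n := by
        rw [pvBinStr, if_neg (by omega : ¬ n = 0)]
      have hne : pvBinStr n ≠ ['1'] := hbs ▸ pvBits_ne_one n h2
      rw [pvLoopA, if_neg hne, pvChain, if_neg (by omega : ¬ n ≤ 1)]
      rw [hbs, pvBits_filter, List.length_replicate]
      set m := PySem.Int.bitCount (n : Int) with hm
      have hm1 : 1 ≤ m := pvBitCount_pos n (by omega)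
      have hmlt : m < n := pvBitCount_lt n h2
      have hcount : ((pvBits n).count '0' : Int)
          = (PySem.Int.bitLength (n : Int) : Int) - (m : Int) := by
        have := pvBits_count0 n
        omega
      rw [hcount, ih m hmlt hm1 f (a0 + 1) _ (by omega)]
      simp
      constructor <;> ring

-- B's one-pass fold computes (non-'0' count, '0' count) on top of its start state
theorem pvFold_counts (l : List Char) : ∀ a b : Nat,
    l.foldl (fun (p : Nat × Nat) ch => if ch = '0' then (p.1, p.2 + 1) else (p.1 + 1, p.2)) (a, b)
      = (a + (l.filter (fun c => decide (c ≠ '0'))).length, b + l.count '0') := by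
  induction l with
  | nil => intro a b; simp
  | cons c t ih =>
    intro a b
    by_cases h : c = '0' <;> simp [h, List.foldl_cons, ih] <;> omega

-- ===== VERDICT (by name: the statement is the Claim_ definition above) =====
theorem solution_spec : Claim_equal_solution := by
  intro s _ hpre
  unfold Spec_solution solution solution_alt
  by_cases h1 : s = "1"
  · subst h1; decide
  · have hl1 : s.toList ≠ ['1'] := by
      intro hc
      apply h1
      have := congrArg String.ofList hc
      simpa using this
    rw [if_neg h1]
    obtain ⟨c, hc, hc0b⟩ := List.any_eq_true.mp hpre
    have hc0 : c ≠ '0' := by simpa using hc0b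
    have hn1 : 1 ≤ (s.toList.filter (fun c => decide (c ≠ '0'))).length := by
      have : c ∈ s.toList.filter (fun c => decide (c ≠ '0')) := by
        simp [List.mem_filter, hc, hc0]
      exact List.length_pos_of_mem this
    have hflen : (s.toList.filter (fun c => decide (c ≠ '0'))).length ≤ s.toList.length :=
      List.length_filter_le _ _
    rw [pvLoopA, if_neg hl1]
    simp only [zero_add]
    rw [pvChain_eq _ hn1 s.toList.length 1 _ (by omega), pvFold_counts]
    simp
    constructor <;> ring
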